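-- pv_equiv track=rewrite | github.com/13568818287/yn-algorithm-study | part4.py | frogJump_1
-- ===== SOURCE A (Python) =====
-- def frogJump_1(n, tmplst):
--     if n <= 2:
--         return n
--
--     if tmplst[n-1] == 0:
--         tmplst[n-1] = frogJump_1(n-1,tmplst)
--
--     if tmplst[n-2] == 0:
--         tmplst[n-2] = frogJump_1(n-2,tmplst)
--
--     return tmplst[n-1] + tmplst[n-2]
-- ===== SOURCE B (Python) =====
-- def frogJump_1(n, tmplst):
--     if n <= 2:
--         return n
--     for i in range(1, n):
--         if tmplst[i] == 0:
--             tmplst[i] = 1 if i == 1 else (2 if i == 2 else tmplst[i - 1] + tmplst[i - 2])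
--     return tmplst[n - 1] + tmplst[n - 2]
-- ===== Notes on version B (the rewrite author's own statement) =====
-- stated objective: alternative
-- what changed: Replaces the memoized top-down recursion with a single iterative bottom-up left-to-right fill of the memo list, returning tmplst[n-1]+tmplst[n-2].
import Mathlib
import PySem

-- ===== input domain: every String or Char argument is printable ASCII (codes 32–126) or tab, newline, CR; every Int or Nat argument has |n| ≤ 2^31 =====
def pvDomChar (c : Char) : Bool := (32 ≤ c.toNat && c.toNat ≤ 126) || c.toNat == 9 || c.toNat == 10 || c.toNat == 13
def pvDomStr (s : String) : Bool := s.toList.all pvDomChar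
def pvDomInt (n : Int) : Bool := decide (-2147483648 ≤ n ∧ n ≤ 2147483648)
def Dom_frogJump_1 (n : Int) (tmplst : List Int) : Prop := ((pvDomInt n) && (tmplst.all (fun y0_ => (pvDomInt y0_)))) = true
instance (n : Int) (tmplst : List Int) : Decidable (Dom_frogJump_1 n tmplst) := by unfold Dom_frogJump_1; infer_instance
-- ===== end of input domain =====

-- B replaces A's memoized recursion by a single bottom-up left-to-right fill of the memo list
-- (alternative decomposition). Both A and B mutate tmplst in place in Python; the equivalence
-- proved here is about the RETURN value only (B may fill memo entries that A's recursion skips).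

-- ===== PORT A =====
-- A's recursion, threading the mutated list as state. List reads use getD 0: Pre_ guarantees
-- every index touched is in range (Python raises IndexError otherwise, excluded by Pre_).
def frogJump_1_go : Nat → List Int → Int × List Int
  | k, t =>
    if k ≤ 2 then ((k : Int), t)
    else
      let t1 := if t.getD (k - 1) 0 = 0 then
                  let p := frogJump_1_go (k - 1) t
                  p.2.set (k - 1) p.1
                else t
      let t2 := if t1.getD (k - 2) 0 = 0 then
                  let p := frogJump_1_go (k - 2) t1
                  p.2.set (k - 2) p.1
                else t1
      (t2.getD (k - 1) 0 + t2.getD (k - 2) 0, t2)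
  termination_by k => k
  decreasing_by all_goals omega

def frogJump_1 (n : Int) (tmplst : List Int) : Int :=
  if n ≤ 2 then n else (frogJump_1_go n.toNat tmplst).1

-- ===== PORT B =====
-- one loop iteration of Source B: for i in range(1, n): if tmplst[i] == 0: tmplst[i] = …
def frogJump_1_alt_step (t : List Int) (i : Nat) : List Int :=
  if t.getD i 0 = 0 then
    t.set i (if i = 1 then 1 else if i = 2 then 2 else t.getD (i - 1) 0 + t.getD (i - 2) 0)
  else t

def frogJump_1_alt (n : Int) (tmplst : List Int) : Int :=
  if n ≤ 2 then n
  else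
    let t := (List.range' 1 (n.toNat - 1)).foldl frogJump_1_alt_step tmplst
    t.getD (n.toNat - 1) 0 + t.getD (n.toNat - 2) 0

-- ===== PRECONDITION & SPEC =====
-- For n ≥ 3 Python A indexes tmplst[n-1], raising IndexError when n > len(tmplst); Pre_ excludes exactly that.
def Pre_frogJump_1 (n : Int) (tmplst : List Int) : Prop := n ≤ 2 ∨ n ≤ (tmplst.length : Int)
instance (n : Int) (tmplst : List Int) : Decidable (Pre_frogJump_1 n tmplst) := by unfold Pre_frogJump_1; infer_instance
def pvWitness_frogJump_1 : Int × List Int := (5, [0, 0, 0, 7, 0])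

def Spec_frogJump_1 (n : Int) (tmplst : List Int) (out : Int) : Prop := out = frogJump_1_alt n tmplst
instance (n : Int) (tmplst : List Int) (out : Int) : Decidable (Spec_frogJump_1 n tmplst out) := by unfold Spec_frogJump_1; infer_instance

-- ===== CLAIM (what is proved, stated in full; the proofs are below) =====
def Claim_equal_frogJump_1 : Prop := ∀ (n : Int) (tmplst : List Int), Dom_frogJump_1 n tmplst → Pre_frogJump_1 n tmplst → Spec_frogJump_1 n tmplst (frogJump_1 n tmplst)

-- ===== LEMMAS AND PROOFS =====

-- the pure value both programs compute at index k, relative to the ORIGINAL list t: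
-- prefilled nonzero entries are used as-is, zero entries are the Fibonacci-like recursion.
def pvF (t : List Int) : Nat → Int
  | k =>
    if k ≤ 2 then (k : Int)
    else (if t.getD (k - 1) 0 = 0 then pvF t (k - 1) else t.getD (k - 1) 0)
       + (if t.getD (k - 2) 0 = 0 then pvF t (k - 2) else t.getD (k - 2) 0)
  termination_by k => k
  decreasing_by all_goals omega

def pvGv (t : List Int) (j : Nat) : Int :=
  if t.getD j 0 = 0 then pvF t j else t.getD j 0

-- invariant tying A's mutated list back to the original one
def pvInv (t t' : List Int) : Prop :=
  ∀ j : Nat, t'.getD j 0 = t.getD j 0 ∨ (t.getD j 0 = 0 ∧ t'.getD j 0 = pvF t j)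

lemma pvInv_refl (t : List Int) : pvInv t t := fun _ => Or.inl rfl

lemma pvInv_read_nonzero {t t' : List Int} (h : pvInv t t') {j : Nat}
    (hz : t'.getD j 0 ≠ 0) : t'.getD j 0 = pvGv t j := by
  unfold pvGv
  rcases h j with h1 | ⟨h0, h1⟩
  · rw [h1] at hz ⊢; rw [if_neg hz]
  · rw [h1, if_pos h0]

lemma pvInv_read_zero {t t' : List Int} (h : pvInv t t') {j : Nat}
    (hz : t'.getD j 0 = 0) : t.getD j 0 = 0 := by
  rcases h j with h1 | ⟨h0, _⟩
  · rw [← h1]; exact hz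
  · exact h0

lemma pvGv_of_zero {t : List Int} {j : Nat} (h : t.getD j 0 = 0) : pvGv t j = pvF t j := by
  unfold pvGv; rw [if_pos h]

lemma pvF_le2 {t : List Int} {k : Nat} (h : k ≤ 2) : pvF t k = (k : Int) := by
  unfold pvF; simp [h]

lemma pvF_ge3 {t : List Int} {k : Nat} (h : ¬ k ≤ 2) :
    pvF t k = pvGv t (k - 1) + pvGv t (k - 2) := by
  conv_lhs => unfold pvF
  simp only [h, if_false]
  unfold pvGv
  split_ifs <;> rfl

lemma getD_set_self {t : List Int} {i : Nat} (h : i < t.length) (v : Int) :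
    (t.set i v).getD i 0 = v := by
  simp [List.getD_eq_getElem?_getD, List.getElem?_set_self h]

lemma getD_set_ne {t : List Int} {i j : Nat} (h : i ≠ j) (v : Int) :
    (t.set i v).getD j 0 = t.getD j 0 := by
  simp [List.getD_eq_getElem?_getD, List.getElem?_set_ne h]

-- frame: frogJump_1_go k writes only indices < k
lemma goA_frame : ∀ k t' (j : Nat), k ≤ j →
    ((frogJump_1_go k t').2).getD j 0 = t'.getD j 0 := by
  intro k
  induction k using Nat.strong_induction_on with
  | _ k ih =>
    intro t' j hkj
    by_cases h2 : k ≤ 2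
    · unfold frogJump_1_go; simp [h2]
    · conv_lhs => unfold frogJump_1_go
      simp only [h2, if_false]
      have key : ∀ (s : List Int) (m : Nat), m + 1 ≤ k →
          (((frogJump_1_go m s).2.set m (frogJump_1_go m s).1)).getD j 0 = s.getD j 0 := by
        intro s m hm
        rw [getD_set_ne (by omega), ih m (by omega) s j (by omega)]
      split_ifs with hz1 hz2 hz2
      · rw [key _ (k - 2) (by omega), key _ (k - 1) (by omega)]
      · rw [key _ (k - 1) (by omega)]
      · rw [key _ (k - 2) (by omega)]
      · rfl

-- main lemma about A's recursion: on any list related to t by pvInv, frogJump_1_go k returns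
-- the pure value pvF t k (for k ≥ 3; k itself for k ≤ 2), preserves the invariant and the length.
lemma goA_correct (t : List Int) :
    ∀ k t', pvInv t t' → t'.length = t.length → k ≤ t.length →
      (frogJump_1_go k t').1 = (if k ≤ 2 then (k : Int) else pvF t k) ∧
      pvInv t (frogJump_1_go k t').2 ∧ (frogJump_1_go k t').2.length = t.length := by
  intro k
  induction k using Nat.strong_induction_on with
  | _ k ih =>
    intro t' hinv hlen hk
    by_cases h2 : k ≤ 2
    · unfold frogJump_1_go; simp [h2, hinv, hlen]
    · -- first branch
      have step1 : ∃ t1 : List Int, pvInv t t1 ∧ t1.length = t.length ∧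
          t1.getD (k - 1) 0 = pvGv t (k - 1) ∧
          t1 = (if t'.getD (k - 1) 0 = 0 then
                  (frogJump_1_go (k - 1) t').2.set (k - 1) (frogJump_1_go (k - 1) t').1
                else t') := by
        by_cases hz : t'.getD (k - 1) 0 = 0
        · obtain ⟨hv, hi, hl⟩ := ih (k - 1) (by omega) t' hinv hlen (by omega)
          have ht0 : t.getD (k - 1) 0 = 0 := pvInv_read_zero hinv hz
          have hv' : (frogJump_1_go (k - 1) t').1 = pvF t (k - 1) := by
            rw [hv]; split_ifs with h
            · rw [pvF_le2 h]
            · rfl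
          have hlt : k - 1 < (frogJump_1_go (k - 1) t').2.length := by omega
          refine ⟨_, ?_, by simp [hl], ?_, (if_pos hz).symm⟩
          · intro j
            by_cases hj : j = k - 1
            · subst hj
              exact Or.inr ⟨ht0, by rw [getD_set_self hlt, hv']⟩
            · rw [getD_set_ne (fun h => hj h.symm)]
              exact hi j
          · rw [getD_set_self hlt, hv', pvGv_of_zero ht0]
        · exact ⟨t', hinv, hlen, pvInv_read_nonzero hinv hz, (if_neg hz).symm⟩
      obtain ⟨t1, hinv1, hlen1, hread1, ht1⟩ := step1
      -- second branch
      have step2 : ∃ t2 : List Int, pvInv t t2 ∧ t2.length = t.length ∧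
          t2.getD (k - 2) 0 = pvGv t (k - 2) ∧ t2.getD (k - 1) 0 = t1.getD (k - 1) 0 ∧
          t2 = (if t1.getD (k - 2) 0 = 0 then
                  (frogJump_1_go (k - 2) t1).2.set (k - 2) (frogJump_1_go (k - 2) t1).1
                else t1) := by
        by_cases hz : t1.getD (k - 2) 0 = 0
        · obtain ⟨hv, hi, hl⟩ := ih (k - 2) (by omega) t1 hinv1 hlen1 (by omega)
          have ht0 : t.getD (k - 2) 0 = 0 := pvInv_read_zero hinv1 hz
          have hv' : (frogJump_1_go (k - 2) t1).1 = pvF t (k - 2) := by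
            rw [hv]; split_ifs with h
            · rw [pvF_le2 h]
            · rfl
          have hlt : k - 2 < (frogJump_1_go (k - 2) t1).2.length := by omega
          refine ⟨_, ?_, by simp [hl], ?_, ?_, (if_pos hz).symm⟩
          · intro j
            by_cases hj : j = k - 2
            · subst hj
              exact Or.inr ⟨ht0, by rw [getD_set_self hlt, hv']⟩
            · rw [getD_set_ne (fun h => hj h.symm)]
              exact hi j
          · rw [getD_set_self hlt, hv', pvGv_of_zero ht0]
          · rw [getD_set_ne (by omega), goA_frame (k - 2) t1 (k - 1) (by omega)]
        · exact ⟨t1, hinv1, hlen1, pvInv_read_nonzero hinv1 hz, rfl, (if_neg hz).symm⟩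
      obtain ⟨t2, hinv2, hlen2, hread2, hread21, ht2⟩ := step2
      have hgo : frogJump_1_go k t' = (t2.getD (k - 1) 0 + t2.getD (k - 2) 0, t2) := by
        conv_lhs => unfold frogJump_1_go
        simp only [h2, if_false]
        rw [← ht1, ← ht2]
      rw [hgo]
      refine ⟨?_, hinv2, hlen2⟩
      simp only [h2, if_false]
      rw [hread21, hread1, hread2, pvF_ge3 h2]

-- B's loop invariant: after processing i = 1 .. m, entries 1..m hold pvGv, the rest is untouched.
lemma foldB_correct (t : List Int) : ∀ m, m < t.length →
    ((List.range' 1 m).foldl frogJump_1_alt_step t).length = t.length ∧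
    (∀ j, 1 ≤ j → j ≤ m → ((List.range' 1 m).foldl frogJump_1_alt_step t).getD j 0 = pvGv t j) ∧
    (∀ j, j = 0 ∨ m < j → ((List.range' 1 m).foldl frogJump_1_alt_step t).getD j 0 = t.getD j 0) := by
  intro m
  induction m with
  | zero => intro _; refine ⟨rfl, by omega, fun j _ => rfl⟩
  | succ m ihm =>
    intro hm
    obtain ⟨hl, h1, h2⟩ := ihm (by omega)
    set u := (List.range' 1 m).foldl frogJump_1_alt_step t with hu
    have hconcat : List.range' 1 (m + 1) = List.range' 1 m ++ [1 + m] := by simp [List.range'_concat]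
    have hfold : (List.range' 1 (m + 1)).foldl frogJump_1_alt_step t
        = frogJump_1_alt_step u (m + 1) := by
      rw [hconcat, List.foldl_append]
      simp [Nat.add_comm 1 m, hu]
    have hum1 : u.getD (m + 1) 0 = t.getD (m + 1) 0 := h2 (m + 1) (Or.inr (by omega))
    rw [hfold]
    unfold frogJump_1_alt_step
    by_cases hz : u.getD (m + 1) 0 = 0
    · have ht0 : t.getD (m + 1) 0 = 0 := by rw [← hum1]; exact hz
      have hlt : m + 1 < u.length := by omega
      -- the value written equals pvGv t (m+1)
      have hval : (if m + 1 = 1 then (1 : Int) else if m + 1 = 2 then 2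
          else u.getD (m + 1 - 1) 0 + u.getD (m + 1 - 2) 0) = pvGv t (m + 1) := by
        rw [pvGv_of_zero ht0]
        by_cases hm1 : m + 1 = 1
        · simp [hm1, pvF_le2 (by omega : (1:Nat) ≤ 2)]
        · by_cases hm2 : m + 1 = 2
          · simp [hm2, pvF_le2 (by omega : (2:Nat) ≤ 2)]
          · have h3 : ¬ m + 1 ≤ 2 := by omega
            simp only [hm1, hm2, if_false]
            rw [pvF_ge3 h3]
            have e1 : m + 1 - 1 = m := by omega
            have e2 : u.getD (m + 1 - 2) 0 = pvGv t (m + 1 - 2) :=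
              h1 (m + 1 - 2) (by omega) (by omega)
            rw [e1, e2, h1 m (by omega) (by omega)]
      simp only [hz, if_true]
      refine ⟨by simp [hl], ?_, ?_⟩
      · intro j hj1 hj2
        by_cases hj : j = m + 1
        · subst hj; rw [getD_set_self hlt, hval]
        · rw [getD_set_ne (by omega)]
          exact h1 j hj1 (by omega)
      · intro j hj
        rw [getD_set_ne (by omega)]
        exact h2 j (by omega)
    · simp only [hz, if_false]
      refine ⟨hl, ?_, fun j hj => h2 j (by omega)⟩
      intro j hj1 hj2
      by_cases hj : j = m + 1
      · subst hj
        rw [hum1]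
        have : t.getD (m + 1) 0 ≠ 0 := by rw [← hum1]; exact hz
        unfold pvGv; rw [if_neg this]
      · exact h1 j hj1 (by omega)

-- ===== VERDICT (by name: the statement is the Claim_ definition above) =====
theorem frogJump_1_spec : Claim_equal_frogJump_1 := by
  intro n t _hdom hpre
  unfold Spec_frogJump_1 frogJump_1 frogJump_1_alt
  by_cases h2 : n ≤ 2
  · simp [h2]
  · simp only [h2, if_false]
    have hlen : n.toNat ≤ t.length := by
      rcases hpre with h | h
      · omega
      · omega
    set k := n.toNat with hk
    have hk3 : ¬ k ≤ 2 := by omega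
    obtain ⟨hv, _, _⟩ := goA_correct t k t (pvInv_refl t) rfl hlen
    rw [hv]
    simp only [hk3, if_false]
    obtain ⟨_, h1, _⟩ := foldB_correct t (k - 1) (by omega)
    rw [h1 (k - 1) (by omega) (by omega), h1 (k - 2) (by omega) (by omega), pvF_ge3 hk3]
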